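-- pv_equiv track=rewrite | github.com/seanchatmangpt/dslmodel | src/dslmodel/commands/disc_autonomous.py | _simplify_technical_terms
-- ===== SOURCE A (Python) =====
-- def _simplify_technical_terms(text: str) -> str:
--     """Simplify technical terminology"""
--     replacements = {
--         "implementation": "setup",
--         "architecture": "structure",
--         "optimization": "improvement",
--         "integration": "connection",
--         "abstraction": "simplified version",
--         "instantiate": "create",
--         "paradigm": "approach",
--         "methodology": "method"
--     }
--
--     result = text
--     for technical, simple in replacements.items():
--         result = result.replace(technical, simple)
--     return result
-- ===== SOURCE B (Python) =====
-- def _simplify_technical_terms(text: str) -> str: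
--     """Simplify technical terminology in one left-to-right pass."""
--     rules = [("implementation", "setup"), ("architecture", "structure"),
--              ("optimization", "improvement"), ("integration", "connection"),
--              ("abstraction", "simplified version"), ("instantiate", "create"),
--              ("paradigm", "approach"), ("methodology", "method")]
--     out = []
--     i = 0
--     while i < len(text):
--         for tech, simple in rules:
--             if text.startswith(tech, i):
--                 out.append(simple)
--                 i += len(tech)
--                 break
--         else:
--             out.append(text[i])
--             i += 1
--     return "".join(out)
-- ===== Notes on version B (the rewrite author's own statement) =====
-- stated objective: alternative
-- what changed: B replaces A's eight sequential full-string replace passes (each rescanning the whole intermediate result) by a single left-to-right scan that tries the same replacement table at each position, so replaced text is never rescanned.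
-- intended difference: On texts containing the substring 'implementationaradigm', A's later passes rewrite characters that its own first replacement produced (at the witness A returns 'setuapproach' where B returns 'setuparadigm'); B's single pass never rescans its own output, which is the intended word-for-word substitution. — e.g. on _simplify_technical_terms("implementationaradigm"): A returns "setuapproach", B returns "setuparadigm"
import Mathlib
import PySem

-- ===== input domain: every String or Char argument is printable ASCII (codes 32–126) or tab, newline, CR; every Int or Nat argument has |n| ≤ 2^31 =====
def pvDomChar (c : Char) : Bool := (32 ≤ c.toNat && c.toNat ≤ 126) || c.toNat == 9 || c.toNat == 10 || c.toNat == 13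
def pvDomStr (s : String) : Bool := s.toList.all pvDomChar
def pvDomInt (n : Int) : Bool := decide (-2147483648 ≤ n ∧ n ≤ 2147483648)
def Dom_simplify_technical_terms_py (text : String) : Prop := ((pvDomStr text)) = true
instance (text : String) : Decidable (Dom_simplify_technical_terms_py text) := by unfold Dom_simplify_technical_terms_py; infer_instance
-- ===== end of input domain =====

-- B replaces A's eight sequential full-string replace passes by one left-to-right scan that tries
-- the same table at each position (objective: alternative single-pass algorithm; where A's cascade
-- re-replaces its own output, B intentionally differs — see D_ below).

-- ===== PORT A =====
-- the dict literal of A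
def pvReplacements : PySem.Dict String String :=
  PySem.Dict.ofList
    [("implementation", "setup"), ("architecture", "structure"),
     ("optimization", "improvement"), ("integration", "connection"),
     ("abstraction", "simplified version"), ("instantiate", "create"),
     ("paradigm", "approach"), ("methodology", "method")]

-- result = text; for technical, simple in replacements.items(): result = result.replace(technical, simple)
def simplify_technical_terms_py (text : String) : String :=
  pvReplacements.items.foldl (fun result p => PySem.Str.replace result p.1 p.2) text

-- ===== PORT B =====
-- the same table, in dict order, as char lists
def pvRules : List (List Char × List Char) :=
  [("implementation".toList, "setup".toList), ("architecture".toList, "structure".toList),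
   ("optimization".toList, "improvement".toList), ("integration".toList, "connection".toList),
   ("abstraction".toList, "simplified version".toList), ("instantiate".toList, "create".toList),
   ("paradigm".toList, "approach".toList), ("methodology".toList, "method".toList)]

-- B's while loop: at position i try the rules in order (for/break), else copy one char
def pvScan : List Char → List Char
  | [] => []
  | c :: t =>
    match pvRules.find? (fun p => p.1.isPrefixOf (c :: t)) with
    | some p => p.2 ++ pvScan (List.drop (p.1.length - 1) t)
    | none => c :: pvScan t
termination_by l => l.length
decreasing_by all_goals first | (simp; omega) | simp

def simplify_technical_terms_py_alt (text : String) : String :=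
  String.ofList (pvScan text.toList)

-- ===== PRECONDITION & SPEC =====
-- On texts containing the substring "implementationaradigm", A's later passes rewrite characters
-- that its own first replacement produced (at the witness A returns "setuapproach" where B returns
-- "setuparadigm"); B's single pass never rescans its own output, which is the intended
-- word-for-word substitution.
def D_simplify_technical_terms_py (text : String) : Prop :=
  PySem.Str.isIn "implementationaradigm" text = true
instance (text : String) : Decidable (D_simplify_technical_terms_py text) := by
  unfold D_simplify_technical_terms_py; infer_instance

def Spec_simplify_technical_terms_py (text : String) (out : String) : Prop :=
  ¬ D_simplify_technical_terms_py text → out = simplify_technical_terms_py_alt text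
instance (text : String) (out : String) : Decidable (Spec_simplify_technical_terms_py text out) := by
  unfold Spec_simplify_technical_terms_py; infer_instance

def pvDiffWitness_simplify_technical_terms_py : String := "implementationaradigm"
def pvDiffWitnessOut_simplify_technical_terms_py : String × String := ("setuapproach", "setuparadigm")

-- ===== CLAIM (what is proved, stated in full; the proofs are below) =====
def Claim_unchanged_simplify_technical_terms_py : Prop := ∀ (text : String), Dom_simplify_technical_terms_py text → Spec_simplify_technical_terms_py text (simplify_technical_terms_py text)
def Claim_changed_simplify_technical_terms_py : Prop := Dom_simplify_technical_terms_py (pvDiffWitness_simplify_technical_terms_py) ∧ D_simplify_technical_terms_py (pvDiffWitness_simplify_technical_terms_py) ∧ simplify_technical_terms_py (pvDiffWitness_simplify_technical_terms_py) = pvDiffWitnessOut_simplify_technical_terms_py.1 ∧ simplify_technical_terms_py_alt (pvDiffWitness_simplify_technical_terms_py) = pvDiffWitnessOut_simplify_technical_terms_py.2 ∧ pvDiffWitnessOut_simplify_technical_terms_py.1 ≠ pvDiffWitnessOut_simplify_technical_terms_py.2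

def Claim_exact_simplify_technical_terms_py : Prop := ∀ (text : String), Dom_simplify_technical_terms_py text → D_simplify_technical_terms_py text → simplify_technical_terms_py text ≠ simplify_technical_terms_py_alt text

-- ===== LEMMAS AND PROOFS =====

-- list-level model of Python's str.replace for a nonempty pattern (leftmost, non-overlapping)
def pvRep (old new : List Char) : List Char → List Char
  | [] => []
  | c :: t =>
    if old.isPrefixOf (c :: t) ∧ old ≠ [] then new ++ pvRep old new (List.drop (old.length - 1) t)
    else c :: pvRep old new t
termination_by l => l.length
decreasing_by all_goals first | (simp; omega) | simp

theorem pvRep_nil (old new : List Char) : pvRep old new [] = [] := by simp [pvRep]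

theorem pvRep_cons_neg (old new : List Char) (c : Char) (t : List Char)
    (h : ¬ old <+: (c :: t)) : pvRep old new (c :: t) = c :: pvRep old new t := by
  rw [pvRep]; simp [List.isPrefixOf_iff_prefix, h]

theorem pvRep_front (old new v : List Char) (h : old ≠ []) :
    pvRep old new (old ++ v) = new ++ pvRep old new v := by
  obtain ⟨o, os, rfl⟩ := List.exists_cons_of_ne_nil h
  rw [List.cons_append, pvRep]
  simp [List.isPrefixOf_iff_prefix, List.prefix_append, List.drop_left]

-- PySem.Chars.replace agrees with pvRep for nonempty old
theorem pvGo_eq (old new : List Char) (hold : old ≠ []) :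
    ∀ (fuel : Nat) (l acc : List Char), l.length ≤ fuel →
      PySem.Chars.replace.go old new fuel l acc = acc.reverse ++ pvRep old new l := by
  intro fuel
  induction fuel with
  | zero =>
    intro l acc hl
    have : l = [] := List.eq_nil_of_length_eq_zero (Nat.le_zero.mp hl)
    subst this; simp [PySem.Chars.replace.go, pvRep_nil]
  | succ n ih =>
    intro l acc hl
    cases l with
    | nil => simp [PySem.Chars.replace.go, pvRep_nil]
    | cons c t =>
      rw [PySem.Chars.replace.go]
      by_cases hp : old.isPrefixOf (c :: t)
      · have hpre : old <+: (c :: t) := List.isPrefixOf_iff_prefix.mp hp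
        simp only [hp, if_true]
        have hlen : (List.drop old.length (c :: t)).length ≤ n := by
          have h1 : 1 ≤ old.length := by
            cases old with
            | nil => exact absurd rfl hold
            | cons _ _ => simp
          simp only [List.length_cons] at hl
          simp only [List.length_drop, List.length_cons]
          omega
        rw [ih _ _ hlen]
        have hguard : old <+: (c :: t) ∧ old ≠ [] := ⟨hpre, hold⟩
        rw [pvRep]
        simp only [List.isPrefixOf_iff_prefix, hguard.1, hguard.2, and_true, if_true,
          ne_eq, not_false_iff]
        have hdrop : List.drop old.length (c :: t) = List.drop (old.length - 1) t := by
          obtain ⟨o, os, rfl⟩ := List.exists_cons_of_ne_nil hold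
          simp
        rw [hdrop]
        simp
      · simp only [hp, if_false]
        have hpre : ¬ old <+: (c :: t) := fun hc => hp (List.isPrefixOf_iff_prefix.mpr hc)
        have hlen : t.length ≤ n := by
          simp only [List.length_cons] at hl
          omega
        rw [ih _ _ hlen, pvRep_cons_neg _ _ _ _ hpre]
        simp

theorem pvRep_eq_replace (old new : List Char) (hold : old ≠ []) (s : List Char) :
    PySem.Chars.replace s old new = pvRep old new s := by
  rw [PySem.Chars.replace]
  have : old.isEmpty = false := by
    cases old with
    | nil => exact absurd rfl hold
    | cons _ _ => rfl
  rw [this]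
  simp only [Bool.false_eq_true, if_false]
  simpa using pvGo_eq old new hold s.length s [] le_rfl

-- the A-side chain of eight replace passes, on char lists
def pvChain (l : List Char) : List Char :=
  pvRules.foldl (fun acc p => pvRep p.1 p.2 acc) l

theorem pvPrefix_split {u a v : List Char} (h : u <+: a ++ v) : u <+: a ∨ a <+: u :=
  List.prefix_or_prefix_of_prefix h (List.prefix_append a v)

-- reflection: a prefix of a replace output whose suffixes cannot touch the replacement text
-- was already a prefix of the input
theorem pvReflect (old new : List Char) (hold : old ≠ []) :
    ∀ (w u : List Char),
      (∀ m, m < u.length → ¬ (List.drop m u <+: new) ∧ ¬ (new <+: List.drop m u)) →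
      u <+: pvRep old new w → u <+: w := by
  intro w
  induction w with
  | nil => intro u _ h; simpa [pvRep_nil] using h
  | cons c t ih =>
    intro u hside h
    by_cases hg : old <+: (c :: t)
    · obtain ⟨v, hv⟩ := hg
      rw [← hv, pvRep_front _ _ _ hold] at h
      cases u with
      | nil => exact List.nil_prefix
      | cons uc uu =>
        rcases pvPrefix_split h with h1 | h2
        · exact absurd h1 (by simpa using (hside 0 (by simp)).1)
        · exact absurd h2 (by simpa using (hside 0 (by simp)).2)
    · rw [pvRep_cons_neg _ _ _ _ hg] at h
      cases u with
      | nil => exact List.nil_prefix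
      | cons uc uu =>
        rw [List.cons_prefix_cons] at h
        obtain ⟨rfl, h'⟩ := h
        have hside' : ∀ m, m < uu.length → ¬ (List.drop m uu <+: new) ∧ ¬ (new <+: List.drop m uu) := by
          intro m hm
          have := hside (m + 1) (by simp; omega)
          simpa using this
        exact List.cons_prefix_cons.mpr ⟨rfl, ih uu hside' h'⟩

-- reflection through a whole chain of replace passes
theorem pvReflectFold (R : List (List Char × List Char))
    (hne : ∀ pr ∈ R, pr.1 ≠ [])
    (u : List Char)
    (hside : ∀ pr ∈ R, ∀ m, m < u.length → ¬ (List.drop m u <+: pr.2) ∧ ¬ (pr.2 <+: List.drop m u)) :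
    ∀ w, u <+: R.foldl (fun acc p => pvRep p.1 p.2 acc) w → u <+: w := by
  induction R using List.reverseRecOn with
  | nil => intro w h; simpa using h
  | append_singleton R' q ih =>
    intro w h
    rw [List.foldl_append, List.foldl_cons, List.foldl_nil] at h
    have h1 := pvReflect q.1 q.2 (hne q (by simp)) _ u (hside q (by simp)) h
    exact ih (fun pr hpr => hne pr (by simp [hpr]))
      (fun pr hpr => hside pr (by simp [hpr])) w h1

-- a replace pass walks through a block it cannot match into
theorem pvRepAppend (old new : List Char) (a v : List Char)
    (hside : ∀ p, p < a.length → ¬ (old <+: (List.drop p a ++ v))) :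
    pvRep old new (a ++ v) = a ++ pvRep old new v := by
  induction a with
  | nil => simp
  | cons d a' ih =>
    have h0 : ¬ old <+: (d :: (a' ++ v)) := by
      have := hside 0 (by simp)
      simpa using this
    have hside' : ∀ p, p < a'.length → ¬ (old <+: (List.drop p a' ++ v)) := by
      intro p hp
      have := hside (p + 1) (by simp; omega)
      simpa using this
    rw [List.cons_append, pvRep_cons_neg _ _ _ _ h0, ih hside']
    simp

-- the input-independent version: no suffix of the block is prefix-compatible with old
theorem pvRepAppend' (old new : List Char) (a v : List Char)
    (hside : ∀ p, p < a.length → ¬ (old <+: List.drop p a) ∧ ¬ (List.drop p a <+: old)) :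
    pvRep old new (a ++ v) = a ++ pvRep old new v := by
  apply pvRepAppend
  intro p hp h
  rcases pvPrefix_split h with h1 | h2
  · exact (hside p hp).1 h1
  · exact (hside p hp).2 h2

theorem pvFoldAppend (R : List (List Char × List Char)) (a : List Char)
    (hside : ∀ pr ∈ R, ∀ p, p < a.length → ¬ (pr.1 <+: List.drop p a) ∧ ¬ (List.drop p a <+: pr.1)) :
    ∀ v, R.foldl (fun acc p => pvRep p.1 p.2 acc) (a ++ v) = a ++ R.foldl (fun acc p => pvRep p.1 p.2 acc) v := by
  induction R with
  | nil => intro v; simp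
  | cons pr R' ih =>
    intro v
    rw [List.foldl_cons, pvRepAppend' _ _ _ _ (hside pr (by simp)), List.foldl_cons]
    exact ih (fun q hq => hside q (by simp [hq])) _

-- when no rule matches at the front, the whole chain just copies the first character
theorem pvFoldCons (R : List (List Char × List Char)) (c : Char) (t : List Char)
    (hne : ∀ pr ∈ R, pr.1 ≠ [])
    (hnp : ∀ pr ∈ R, ¬ (pr.1 <+: (c :: t)))
    (hpair : R.Pairwise (fun p q => ∀ m, m < q.1.length - 1 →
      ¬ (List.drop (m + 1) q.1 <+: p.2) ∧ ¬ (p.2 <+: List.drop (m + 1) q.1))) :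
    R.foldl (fun acc p => pvRep p.1 p.2 acc) (c :: t) = c :: R.foldl (fun acc p => pvRep p.1 p.2 acc) t := by
  induction R using List.reverseRecOn with
  | nil => simp
  | append_singleton R' q ih =>
    have hpair' : R'.Pairwise _ := (List.pairwise_append.mp hpair).1
    have hq : ∀ p ∈ R', ∀ m, m < q.1.length - 1 →
        ¬ (List.drop (m + 1) q.1 <+: p.2) ∧ ¬ (p.2 <+: List.drop (m + 1) q.1) := by
      intro p hp
      exact (List.pairwise_append.mp hpair).2.2 p hp q (by simp)
    have hstep := ih (fun pr hpr => hne pr (by simp [hpr]))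
      (fun pr hpr => hnp pr (by simp [hpr])) hpair'
    rw [List.foldl_append, List.foldl_cons, List.foldl_nil, hstep]
    have hqnp : ¬ q.1 <+: (c :: R'.foldl (fun acc p => pvRep p.1 p.2 acc) t) := by
      intro hpref
      cases hq1 : q.1 with
      | nil => exact hne q (by simp) hq1
      | cons qc qt =>
        rw [hq1, List.cons_prefix_cons] at hpref
        obtain ⟨rfl, hqt⟩ := hpref
        have hrefl := pvReflectFold R' (fun pr hpr => hne pr (by simp [hpr])) qt
          (by
            intro pr hpr m hm
            have := hq pr hpr m (by rw [hq1]; simp; omega)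
            rw [hq1] at this
            simpa using this) t hqt
        exact hnp q (by simp) (by rw [hq1]; exact List.cons_prefix_cons.mpr ⟨rfl, hrefl⟩)
    rw [pvRep_cons_neg _ _ _ _ hqnp, List.foldl_append, List.foldl_cons, List.foldl_nil]

-- a matched rule (k, r) in the middle of the table: the passes before it walk through k,
-- the pass for k rewrites it to r, the passes after it walk through r
theorem pvBranch (Lpre Lpost : List (List Char × List Char)) (k r : List Char) (hk : k ≠ [])
    (hside1 : ∀ pr ∈ Lpre, ∀ p, p < k.length → ¬ (pr.1 <+: List.drop p k) ∧ ¬ (List.drop p k <+: pr.1))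
    (hside2 : ∀ pr ∈ Lpost, ∀ p, p < r.length → ¬ (pr.1 <+: List.drop p r) ∧ ¬ (List.drop p r <+: pr.1))
    (u : List Char) :
    (Lpre ++ (k, r) :: Lpost).foldl (fun acc p => pvRep p.1 p.2 acc) (k ++ u)
      = r ++ (Lpre ++ (k, r) :: Lpost).foldl (fun acc p => pvRep p.1 p.2 acc) u := by
  rw [List.foldl_append, List.foldl_cons, pvFoldAppend _ _ hside1, pvRep_front _ _ _ hk,
    pvFoldAppend _ _ hside2, List.foldl_append, List.foldl_cons]

-- scan unfolding helpers
theorem pvScan_cons_some (c : Char) (t : List Char) (k r : List Char)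
    (hfind : pvRules.find? (fun p => p.1.isPrefixOf (c :: t)) = some (k, r)) :
    pvScan (c :: t) = r ++ pvScan (List.drop (k.length - 1) t) := by
  rw [pvScan, hfind]

theorem pvScan_nil : pvScan [] = [] := by
  rw [pvScan]

theorem pvScan_cons_none (c : Char) (t : List Char)
    (hfind : pvRules.find? (fun p => p.1.isPrefixOf (c :: t)) = none) :
    pvScan (c :: t) = c :: pvScan t := by
  rw [pvScan, hfind]

theorem pvGood_suffix {u l : List Char} (h : u <:+ l)
    (hg : ¬ ("implementationaradigm".toList <:+: l)) :
    ¬ ("implementationaradigm".toList <:+: u) :=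
  fun hc => hg (hc.trans h.isInfix)

theorem pvDropTail {k u : List Char} {c : Char} {t : List Char} (hk : k ≠ [])
    (hu : k ++ u = c :: t) : List.drop (k.length - 1) t = u := by
  obtain ⟨kc, kt, rfl⟩ := List.exists_cons_of_ne_nil hk
  rw [List.cons_append] at hu
  obtain ⟨-, h2⟩ := List.cons.inj hu
  rw [← h2]
  simp only [List.length_cons, Nat.add_sub_cancel]
  exact List.drop_left

-- MAIN LEMMA: outside the cascade region, the eight-pass chain equals the single scan
theorem pvChainEqScan : ∀ (n : Nat) (l : List Char), l.length ≤ n →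
    ¬ ("implementationaradigm".toList <:+: l) → pvChain l = pvScan l := by
  intro n
  induction n with
  | zero =>
    intro l hl _
    have : l = [] := List.eq_nil_of_length_eq_zero (Nat.le_zero.mp hl)
    subst this
    simp [pvChain, pvRules, pvRep_nil, pvScan]
  | succ n ih =>
    intro l hl hgood
    cases l with
    | nil => simp [pvChain, pvRules, pvRep_nil, pvScan]
    | cons c t =>
      have hIH : ∀ (k u : List Char), k ≠ [] → k ++ u = c :: t → pvChain u = pvScan u := by
        intro k u hk hu
        apply ih
        · have hlen := congrArg List.length hu
          simp only [List.length_append, List.length_cons] at hlen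
          have h1 : 1 ≤ k.length := by
            cases k with
            | nil => exact absurd rfl hk
            | cons _ _ => simp
          simp only [List.length_cons] at hl
          omega
        · exact pvGood_suffix ⟨k, hu⟩ hgood
      by_cases h0 : "implementation".toList <+: (c :: t)
      · obtain ⟨u, hu⟩ := h0
        have hfind : pvRules.find? (fun p => p.1.isPrefixOf (c :: t)) = some ("implementation".toList, "setup".toList) := by
          rw [pvRules, List.find?_cons_of_pos]
          rw [← hu]; simp [List.isPrefixOf_iff_prefix, List.prefix_append]
        have hNoAradigm : ¬ ("aradigm".toList <+: u) := by
          intro hc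
          obtain ⟨w, hw⟩ := hc
          apply hgood
          refine ⟨[], w, ?_⟩
          rw [← hu, ← hw, List.nil_append,
            (by decide : ("implementationaradigm".toList : List Char) = "implementation".toList ++ "aradigm".toList),
            List.append_assoc]
        have hchain : pvChain (c :: t) = "setup".toList ++ pvChain u := by
          simp only [pvChain]
          rw [← hu, (by decide : pvRules = ("implementation".toList, "setup".toList) :: ([("architecture".toList, "structure".toList), ("optimization".toList, "improvement".toList), ("integration".toList, "connection".toList), ("abstraction".toList, "simplified version".toList), ("instantiate".toList, "create".toList)] ++ (("paradigm".toList, "approach".toList) :: [("methodology".toList, "method".toList)])))]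
          simp only [List.foldl_cons, List.foldl_append, List.foldl_nil]
          rw [pvRep_front _ _ _ (by decide)]
          rw [pvRepAppend' "architecture".toList "structure".toList "setup".toList _ (by decide),
            pvRepAppend' "optimization".toList "improvement".toList "setup".toList _ (by decide),
            pvRepAppend' "integration".toList "connection".toList "setup".toList _ (by decide),
            pvRepAppend' "abstraction".toList "simplified version".toList "setup".toList _ (by decide),
            pvRepAppend' "instantiate".toList "create".toList "setup".toList _ (by decide)]
          generalize hYg : pvRep "instantiate".toList "create".toList
            (pvRep "abstraction".toList "simplified version".toList
              (pvRep "integration".toList "connection".toList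
                (pvRep "optimization".toList "improvement".toList
                  (pvRep "architecture".toList "structure".toList
                    (pvRep "implementation".toList "setup".toList u))))) = Y
          have hY : ¬ ("aradigm".toList <+: Y) := by
            rw [← hYg]
            intro hc
            exact hNoAradigm (pvReflectFold [("implementation".toList, "setup".toList), ("architecture".toList, "structure".toList), ("optimization".toList, "improvement".toList), ("integration".toList, "connection".toList), ("abstraction".toList, "simplified version".toList), ("instantiate".toList, "create".toList)] (by decide) "aradigm".toList (by decide) u
              (by simpa only [List.foldl_cons, List.foldl_nil] using hc))
          have hsetupSide : ∀ p, p < ("setup".toList : List Char).length →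
              ¬ ("paradigm".toList <+: List.drop p "setup".toList ++ Y) := by
            intro p hp
            have hp5 : p < 5 := lt_of_lt_of_eq hp (by decide)
            interval_cases p
            · intro hpref
              rw [(by decide : List.drop 0 ("setup".toList : List Char) = 's' :: "etup".toList),
                List.cons_append,
                (by decide : ("paradigm".toList : List Char) = 'p' :: "aradigm".toList)] at hpref
              exact absurd (List.cons_prefix_cons.mp hpref).1 (by decide)
            · intro hpref
              rw [(by decide : List.drop 1 ("setup".toList : List Char) = 'e' :: "tup".toList),
                List.cons_append,
                (by decide : ("paradigm".toList : List Char) = 'p' :: "aradigm".toList)] at hpref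
              exact absurd (List.cons_prefix_cons.mp hpref).1 (by decide)
            · intro hpref
              rw [(by decide : List.drop 2 ("setup".toList : List Char) = 't' :: "up".toList),
                List.cons_append,
                (by decide : ("paradigm".toList : List Char) = 'p' :: "aradigm".toList)] at hpref
              exact absurd (List.cons_prefix_cons.mp hpref).1 (by decide)
            · intro hpref
              rw [(by decide : List.drop 3 ("setup".toList : List Char) = 'u' :: "p".toList),
                List.cons_append,
                (by decide : ("paradigm".toList : List Char) = 'p' :: "aradigm".toList)] at hpref
              exact absurd (List.cons_prefix_cons.mp hpref).1 (by decide)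
            · intro hpref
              rw [(by decide : List.drop 4 ("setup".toList : List Char) = ['p']),
                List.singleton_append,
                (by decide : ("paradigm".toList : List Char) = 'p' :: "aradigm".toList)] at hpref
              exact hY (List.cons_prefix_cons.mp hpref).2
          rw [pvRepAppend "paradigm".toList "approach".toList "setup".toList Y hsetupSide]
          rw [pvRepAppend' "methodology".toList "method".toList "setup".toList _ (by decide)]
        rw [pvScan_cons_some _ _ _ _ hfind, pvDropTail (by decide) hu, hchain, hIH _ u (by decide) hu]
      · by_cases h1 : "architecture".toList <+: (c :: t)
        · obtain ⟨u, hu⟩ := h1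
          have hfind : pvRules.find? (fun p => p.1.isPrefixOf (c :: t)) = some ("architecture".toList, "structure".toList) := by
            rw [pvRules, List.find?_cons_of_neg (by simpa [List.isPrefixOf_iff_prefix] using h0),
              List.find?_cons_of_pos]
            rw [← hu]; simp [List.isPrefixOf_iff_prefix, List.prefix_append]
          have hchain : pvChain (c :: t) = "structure".toList ++ pvChain u := by
            simp only [pvChain]
            rw [← hu, (by decide : pvRules = [("implementation".toList, "setup".toList)] ++ (("architecture".toList, "structure".toList) :: [("optimization".toList, "improvement".toList), ("integration".toList, "connection".toList), ("abstraction".toList, "simplified version".toList), ("instantiate".toList, "create".toList), ("paradigm".toList, "approach".toList), ("methodology".toList, "method".toList)]))]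
            exact pvBranch _ _ _ _ (by decide) (by decide) (by decide) u
          rw [pvScan_cons_some _ _ _ _ hfind, pvDropTail (by decide) hu, hchain, hIH _ u (by decide) hu]
        · by_cases h2 : "optimization".toList <+: (c :: t)
          · obtain ⟨u, hu⟩ := h2
            have hfind : pvRules.find? (fun p => p.1.isPrefixOf (c :: t)) = some ("optimization".toList, "improvement".toList) := by
              rw [pvRules, List.find?_cons_of_neg (by simpa [List.isPrefixOf_iff_prefix] using h0),
                List.find?_cons_of_neg (by simpa [List.isPrefixOf_iff_prefix] using h1),
                List.find?_cons_of_pos]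
              rw [← hu]; simp [List.isPrefixOf_iff_prefix, List.prefix_append]
            have hchain : pvChain (c :: t) = "improvement".toList ++ pvChain u := by
              simp only [pvChain]
              rw [← hu, (by decide : pvRules = [("implementation".toList, "setup".toList), ("architecture".toList, "structure".toList)] ++ (("optimization".toList, "improvement".toList) :: [("integration".toList, "connection".toList), ("abstraction".toList, "simplified version".toList), ("instantiate".toList, "create".toList), ("paradigm".toList, "approach".toList), ("methodology".toList, "method".toList)]))]
              exact pvBranch _ _ _ _ (by decide) (by decide) (by decide) u
            rw [pvScan_cons_some _ _ _ _ hfind, pvDropTail (by decide) hu, hchain, hIH _ u (by decide) hu]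
          · by_cases h3 : "integration".toList <+: (c :: t)
            · obtain ⟨u, hu⟩ := h3
              have hfind : pvRules.find? (fun p => p.1.isPrefixOf (c :: t)) = some ("integration".toList, "connection".toList) := by
                rw [pvRules, List.find?_cons_of_neg (by simpa [List.isPrefixOf_iff_prefix] using h0),
                  List.find?_cons_of_neg (by simpa [List.isPrefixOf_iff_prefix] using h1),
                  List.find?_cons_of_neg (by simpa [List.isPrefixOf_iff_prefix] using h2),
                  List.find?_cons_of_pos]
                rw [← hu]; simp [List.isPrefixOf_iff_prefix, List.prefix_append]
              have hchain : pvChain (c :: t) = "connection".toList ++ pvChain u := by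
                simp only [pvChain]
                rw [← hu, (by decide : pvRules = [("implementation".toList, "setup".toList), ("architecture".toList, "structure".toList), ("optimization".toList, "improvement".toList)] ++ (("integration".toList, "connection".toList) :: [("abstraction".toList, "simplified version".toList), ("instantiate".toList, "create".toList), ("paradigm".toList, "approach".toList), ("methodology".toList, "method".toList)]))]
                exact pvBranch _ _ _ _ (by decide) (by decide) (by decide) u
              rw [pvScan_cons_some _ _ _ _ hfind, pvDropTail (by decide) hu, hchain, hIH _ u (by decide) hu]
            · by_cases h4 : "abstraction".toList <+: (c :: t)
              · obtain ⟨u, hu⟩ := h4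
                have hfind : pvRules.find? (fun p => p.1.isPrefixOf (c :: t)) = some ("abstraction".toList, "simplified version".toList) := by
                  rw [pvRules, List.find?_cons_of_neg (by simpa [List.isPrefixOf_iff_prefix] using h0),
                    List.find?_cons_of_neg (by simpa [List.isPrefixOf_iff_prefix] using h1),
                    List.find?_cons_of_neg (by simpa [List.isPrefixOf_iff_prefix] using h2),
                    List.find?_cons_of_neg (by simpa [List.isPrefixOf_iff_prefix] using h3),
                    List.find?_cons_of_pos]
                  rw [← hu]; simp [List.isPrefixOf_iff_prefix, List.prefix_append]
                have hchain : pvChain (c :: t) = "simplified version".toList ++ pvChain u := by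
                  simp only [pvChain]
                  rw [← hu, (by decide : pvRules = [("implementation".toList, "setup".toList), ("architecture".toList, "structure".toList), ("optimization".toList, "improvement".toList), ("integration".toList, "connection".toList)] ++ (("abstraction".toList, "simplified version".toList) :: [("instantiate".toList, "create".toList), ("paradigm".toList, "approach".toList), ("methodology".toList, "method".toList)]))]
                  exact pvBranch _ _ _ _ (by decide) (by decide) (by decide) u
                rw [pvScan_cons_some _ _ _ _ hfind, pvDropTail (by decide) hu, hchain, hIH _ u (by decide) hu]
              · by_cases h5 : "instantiate".toList <+: (c :: t)
                · obtain ⟨u, hu⟩ := h5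
                  have hfind : pvRules.find? (fun p => p.1.isPrefixOf (c :: t)) = some ("instantiate".toList, "create".toList) := by
                    rw [pvRules, List.find?_cons_of_neg (by simpa [List.isPrefixOf_iff_prefix] using h0),
                      List.find?_cons_of_neg (by simpa [List.isPrefixOf_iff_prefix] using h1),
                      List.find?_cons_of_neg (by simpa [List.isPrefixOf_iff_prefix] using h2),
                      List.find?_cons_of_neg (by simpa [List.isPrefixOf_iff_prefix] using h3),
                      List.find?_cons_of_neg (by simpa [List.isPrefixOf_iff_prefix] using h4),
                      List.find?_cons_of_pos]
                    rw [← hu]; simp [List.isPrefixOf_iff_prefix, List.prefix_append]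
                  have hchain : pvChain (c :: t) = "create".toList ++ pvChain u := by
                    simp only [pvChain]
                    rw [← hu, (by decide : pvRules = [("implementation".toList, "setup".toList), ("architecture".toList, "structure".toList), ("optimization".toList, "improvement".toList), ("integration".toList, "connection".toList), ("abstraction".toList, "simplified version".toList)] ++ (("instantiate".toList, "create".toList) :: [("paradigm".toList, "approach".toList), ("methodology".toList, "method".toList)]))]
                    exact pvBranch _ _ _ _ (by decide) (by decide) (by decide) u
                  rw [pvScan_cons_some _ _ _ _ hfind, pvDropTail (by decide) hu, hchain, hIH _ u (by decide) hu]
                · by_cases h6 : "paradigm".toList <+: (c :: t)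
                  · obtain ⟨u, hu⟩ := h6
                    have hfind : pvRules.find? (fun p => p.1.isPrefixOf (c :: t)) = some ("paradigm".toList, "approach".toList) := by
                      rw [pvRules, List.find?_cons_of_neg (by simpa [List.isPrefixOf_iff_prefix] using h0),
                        List.find?_cons_of_neg (by simpa [List.isPrefixOf_iff_prefix] using h1),
                        List.find?_cons_of_neg (by simpa [List.isPrefixOf_iff_prefix] using h2),
                        List.find?_cons_of_neg (by simpa [List.isPrefixOf_iff_prefix] using h3),
                        List.find?_cons_of_neg (by simpa [List.isPrefixOf_iff_prefix] using h4),
                        List.find?_cons_of_neg (by simpa [List.isPrefixOf_iff_prefix] using h5),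
                        List.find?_cons_of_pos]
                      rw [← hu]; simp [List.isPrefixOf_iff_prefix, List.prefix_append]
                    have hchain : pvChain (c :: t) = "approach".toList ++ pvChain u := by
                      simp only [pvChain]
                      rw [← hu, (by decide : pvRules = [("implementation".toList, "setup".toList), ("architecture".toList, "structure".toList), ("optimization".toList, "improvement".toList), ("integration".toList, "connection".toList), ("abstraction".toList, "simplified version".toList), ("instantiate".toList, "create".toList)] ++ (("paradigm".toList, "approach".toList) :: [("methodology".toList, "method".toList)]))]
                      exact pvBranch _ _ _ _ (by decide) (by decide) (by decide) u
                    rw [pvScan_cons_some _ _ _ _ hfind, pvDropTail (by decide) hu, hchain, hIH _ u (by decide) hu]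
                  · by_cases h7 : "methodology".toList <+: (c :: t)
                    · obtain ⟨u, hu⟩ := h7
                      have hfind : pvRules.find? (fun p => p.1.isPrefixOf (c :: t)) = some ("methodology".toList, "method".toList) := by
                        rw [pvRules, List.find?_cons_of_neg (by simpa [List.isPrefixOf_iff_prefix] using h0),
                          List.find?_cons_of_neg (by simpa [List.isPrefixOf_iff_prefix] using h1),
                          List.find?_cons_of_neg (by simpa [List.isPrefixOf_iff_prefix] using h2),
                          List.find?_cons_of_neg (by simpa [List.isPrefixOf_iff_prefix] using h3),
                          List.find?_cons_of_neg (by simpa [List.isPrefixOf_iff_prefix] using h4),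
                          List.find?_cons_of_neg (by simpa [List.isPrefixOf_iff_prefix] using h5),
                          List.find?_cons_of_neg (by simpa [List.isPrefixOf_iff_prefix] using h6),
                          List.find?_cons_of_pos]
                        rw [← hu]; simp [List.isPrefixOf_iff_prefix, List.prefix_append]
                      have hchain : pvChain (c :: t) = "method".toList ++ pvChain u := by
                        simp only [pvChain]
                        rw [← hu, (by decide : pvRules = [("implementation".toList, "setup".toList), ("architecture".toList, "structure".toList), ("optimization".toList, "improvement".toList), ("integration".toList, "connection".toList), ("abstraction".toList, "simplified version".toList), ("instantiate".toList, "create".toList), ("paradigm".toList, "approach".toList)] ++ (("methodology".toList, "method".toList) :: []))]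
                        exact pvBranch _ _ _ _ (by decide) (by decide) (by decide) u
                      rw [pvScan_cons_some _ _ _ _ hfind, pvDropTail (by decide) hu, hchain, hIH _ u (by decide) hu]
                    · have hfind : pvRules.find? (fun p => p.1.isPrefixOf (c :: t)) = none := by
                        rw [pvRules,
                          List.find?_cons_of_neg (by simpa [List.isPrefixOf_iff_prefix] using h0),
                          List.find?_cons_of_neg (by simpa [List.isPrefixOf_iff_prefix] using h1),
                          List.find?_cons_of_neg (by simpa [List.isPrefixOf_iff_prefix] using h2),
                          List.find?_cons_of_neg (by simpa [List.isPrefixOf_iff_prefix] using h3),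
                          List.find?_cons_of_neg (by simpa [List.isPrefixOf_iff_prefix] using h4),
                          List.find?_cons_of_neg (by simpa [List.isPrefixOf_iff_prefix] using h5),
                          List.find?_cons_of_neg (by simpa [List.isPrefixOf_iff_prefix] using h6),
                          List.find?_cons_of_neg (by simpa [List.isPrefixOf_iff_prefix] using h7)]
                        rfl
                      have hnp : ∀ pr ∈ pvRules, ¬ (pr.1 <+: (c :: t)) := by
                        intro pr hpr
                        rw [pvRules] at hpr
                        simp only [List.mem_cons, List.not_mem_nil, or_false] at hpr
                        rcases hpr with h | h | h | h | h | h | h | h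
                        · rw [h]; exact h0
                        · rw [h]; exact h1
                        · rw [h]; exact h2
                        · rw [h]; exact h3
                        · rw [h]; exact h4
                        · rw [h]; exact h5
                        · rw [h]; exact h6
                        · rw [h]; exact h7
                      have hchain : pvChain (c :: t) = c :: pvChain t := by
                        rw [pvChain, pvFoldCons _ _ _ (by decide) hnp (by decide), pvChain]
                      have hgt : ¬ ("implementationaradigm".toList <:+: t) :=
                        pvGood_suffix ⟨[c], rfl⟩ hgood
                      have hlt : t.length ≤ n := by
                        simp only [List.length_cons] at hl
                        omega
                      rw [hchain, pvScan_cons_none _ _ hfind, ih t hlt hgt]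

theorem pvPrefixSplitEq {x u b v : List Char} (h : x ++ u = b ++ v) : x <+: b ∨ b <+: x :=
  pvPrefix_split (⟨u, h⟩ : x <+: b ++ v)

theorem pvInfixAppendRight (k u b : List Char) (hlt : k.length < b.length)
    (hside : ∀ p, p < k.length → ¬ (List.drop p k <+: b))
    (h : b <:+: k ++ u) : b <:+: u := by
  obtain ⟨s, t2, heq⟩ := h
  rw [List.append_assoc] at heq
  by_cases hs : s.length < k.length
  · exfalso
    have heq2 : List.drop s.length (k ++ u) = b ++ t2 := by rw [← heq, List.drop_left]
    rw [List.drop_append_of_le_length (le_of_lt hs)] at heq2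
    rcases pvPrefixSplitEq heq2 with h1 | h2
    · exact hside s.length hs h1
    · have hL := h2.length_le
      rw [List.length_drop] at hL
      omega
  · push_neg at hs
    refine ⟨List.drop k.length s, t2, ?_⟩
    have heq3 := congrArg (List.drop k.length) heq
    rw [List.drop_append_of_le_length hs, List.drop_left] at heq3
    rw [List.append_assoc]
    exact heq3

-- an occurrence of "implementationaradigm" in "implementation" ++ u that is not at the front lies in u
theorem pvBadSplitImpl {u : List Char}
    (h : "implementationaradigm".toList <:+: "implementation".toList ++ u)
    (hna : ¬ ("aradigm".toList <+: u)) :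
    "implementationaradigm".toList <:+: u := by
  obtain ⟨s, t2, heq⟩ := h
  rw [List.append_assoc] at heq
  by_cases hs : s.length < ("implementation".toList : List Char).length
  · exfalso
    have heq2 : List.drop s.length ("implementation".toList ++ u) = "implementationaradigm".toList ++ t2 := by
      rw [← heq, List.drop_left]
    rw [List.drop_append_of_le_length (le_of_lt hs)] at heq2
    rcases pvPrefixSplitEq heq2 with h1 | h2
    · cases s with
      | nil =>
        simp only [List.nil_append] at heq
        apply hna
        have hu2 : "implementation".toList ++ ("aradigm".toList ++ t2) = "implementation".toList ++ u := by
          rw [← List.append_assoc,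
            (by decide : ("implementation".toList : List Char) ++ "aradigm".toList = "implementationaradigm".toList)]
          exact heq
        exact ⟨t2, List.append_cancel_left hu2⟩
      | cons a s' =>
        have hdec : ∀ p, p < 13 → ¬ (List.drop (p + 1) ("implementation".toList : List Char) <+: "implementationaradigm".toList) := by decide
        have hlen : s'.length + 1 < 14 := by
          have := lt_of_lt_of_eq hs (by decide : ("implementation".toList : List Char).length = 14)
          simpa using this
        exact hdec s'.length (by omega) (by simpa using h1)
    · have hL := h2.length_le
      rw [List.length_drop] at hL
      have h21 : ("implementationaradigm".toList : List Char).length = 21 := by decide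
      have h14 : ("implementation".toList : List Char).length = 14 := by decide
      omega
  · push_neg at hs
    refine ⟨List.drop ("implementation".toList : List Char).length s, t2, ?_⟩
    have heq3 := congrArg (List.drop ("implementation".toList : List Char).length) heq
    rw [List.drop_append_of_le_length hs, List.drop_left] at heq3
    rw [List.append_assoc]
    exact heq3

theorem pvSetuNe (X Y : List Char) : "setuapproach".toList ++ X ≠ "setup".toList ++ Y := by
  intro h
  rw [(by decide : ("setuapproach".toList : List Char) = ['s', 'e', 't', 'u', 'a', 'p', 'p', 'r', 'o', 'a', 'c', 'h']),
    (by decide : ("setup".toList : List Char) = ['s', 'e', 't', 'u', 'p'])] at h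
  simp only [List.cons_append, List.nil_append, List.cons.injEq] at h
  exact absurd h.2.2.2.2.1 (by decide)

-- TIGHTNESS: inside the cascade region the two programs always disagree
theorem pvChainNeScanAux : ∀ (n : Nat) (l : List Char), l.length ≤ n →
    "implementationaradigm".toList <:+: l → pvChain l ≠ pvScan l := by
  intro n
  induction n with
  | zero =>
    intro l hl hbad
    have : l = [] := List.eq_nil_of_length_eq_zero (Nat.le_zero.mp hl)
    subst this
    exact absurd (List.infix_nil.mp hbad) (by decide)
  | succ n ih =>
    intro l hl hbad
    cases l with
    | nil => exact absurd (List.infix_nil.mp hbad) (by decide)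
    | cons c t =>
      have hIHne : ∀ (k u : List Char), k ≠ [] → k ++ u = c :: t →
          "implementationaradigm".toList <:+: u → pvChain u ≠ pvScan u := by
        intro k u hk hu hb
        apply ih
        · have hlen := congrArg List.length hu
          simp only [List.length_append, List.length_cons] at hlen
          have h1 : 1 ≤ k.length := by
            cases k with
            | nil => exact absurd rfl hk
            | cons _ _ => simp
          simp only [List.length_cons] at hl
          omega
        · exact hb
      by_cases h0 : "implementation".toList <+: (c :: t)
      · obtain ⟨u, hu⟩ := h0
        have hfind : pvRules.find? (fun p => p.1.isPrefixOf (c :: t)) = some ("implementation".toList, "setup".toList) := by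
          rw [pvRules, List.find?_cons_of_pos]
          rw [← hu]; simp [List.isPrefixOf_iff_prefix, List.prefix_append]
        by_cases ha : "aradigm".toList <+: u
        · -- the cascade fires: A rewrites the phantom paradigm, B does not
          obtain ⟨w, hw⟩ := ha
          rw [pvScan_cons_some _ _ _ _ hfind, pvDropTail (by decide) hu]
          simp only [pvChain]
          rw [← hu, ← hw, (by decide : pvRules = ("implementation".toList, "setup".toList) :: ([("architecture".toList, "structure".toList), ("optimization".toList, "improvement".toList), ("integration".toList, "connection".toList), ("abstraction".toList, "simplified version".toList), ("instantiate".toList, "create".toList)] ++ (("paradigm".toList, "approach".toList) :: [("methodology".toList, "method".toList)])))]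
          simp only [List.foldl_cons, List.foldl_append, List.foldl_nil]
          rw [pvRep_front _ _ _ (by decide)]
          rw [pvRepAppend' "architecture".toList "structure".toList "setup".toList _ (by decide),
            pvRepAppend' "optimization".toList "improvement".toList "setup".toList _ (by decide),
            pvRepAppend' "integration".toList "connection".toList "setup".toList _ (by decide),
            pvRepAppend' "abstraction".toList "simplified version".toList "setup".toList _ (by decide),
            pvRepAppend' "instantiate".toList "create".toList "setup".toList _ (by decide)]
          rw [pvRepAppend' "implementation".toList "setup".toList "aradigm".toList _ (by decide),
            pvRepAppend' "architecture".toList "structure".toList "aradigm".toList _ (by decide),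
            pvRepAppend' "optimization".toList "improvement".toList "aradigm".toList _ (by decide),
            pvRepAppend' "integration".toList "connection".toList "aradigm".toList _ (by decide),
            pvRepAppend' "abstraction".toList "simplified version".toList "aradigm".toList _ (by decide),
            pvRepAppend' "instantiate".toList "create".toList "aradigm".toList _ (by decide)]
          rw [← List.append_assoc,
            (by decide : ("setup".toList : List Char) ++ "aradigm".toList = "setu".toList ++ "paradigm".toList),
            List.append_assoc]
          rw [pvRepAppend' "paradigm".toList "approach".toList "setu".toList _ (by decide)]
          rw [pvRep_front _ _ _ (by decide)]
          rw [pvRepAppend' "methodology".toList "method".toList "setu".toList _ (by decide)]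
          rw [pvRepAppend' "methodology".toList "method".toList "approach".toList _ (by decide)]
          rw [← List.append_assoc,
            (by decide : ("setu".toList : List Char) ++ "approach".toList = "setuapproach".toList)]
          exact pvSetuNe _ _
        · -- occurrence further right: both sides emit "setup" and recurse
          have hchain : pvChain (c :: t) = "setup".toList ++ pvChain u := by
            simp only [pvChain]
            rw [← hu, (by decide : pvRules = ("implementation".toList, "setup".toList) :: ([("architecture".toList, "structure".toList), ("optimization".toList, "improvement".toList), ("integration".toList, "connection".toList), ("abstraction".toList, "simplified version".toList), ("instantiate".toList, "create".toList)] ++ (("paradigm".toList, "approach".toList) :: [("methodology".toList, "method".toList)])))]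
            simp only [List.foldl_cons, List.foldl_append, List.foldl_nil]
            rw [pvRep_front _ _ _ (by decide)]
            rw [pvRepAppend' "architecture".toList "structure".toList "setup".toList _ (by decide),
              pvRepAppend' "optimization".toList "improvement".toList "setup".toList _ (by decide),
              pvRepAppend' "integration".toList "connection".toList "setup".toList _ (by decide),
              pvRepAppend' "abstraction".toList "simplified version".toList "setup".toList _ (by decide),
              pvRepAppend' "instantiate".toList "create".toList "setup".toList _ (by decide)]
            generalize hYg : pvRep "instantiate".toList "create".toList
              (pvRep "abstraction".toList "simplified version".toList
                (pvRep "integration".toList "connection".toList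
                  (pvRep "optimization".toList "improvement".toList
                    (pvRep "architecture".toList "structure".toList
                      (pvRep "implementation".toList "setup".toList u))))) = Y
            have hY : ¬ ("aradigm".toList <+: Y) := by
              rw [← hYg]
              intro hc
              exact ha (pvReflectFold [("implementation".toList, "setup".toList), ("architecture".toList, "structure".toList), ("optimization".toList, "improvement".toList), ("integration".toList, "connection".toList), ("abstraction".toList, "simplified version".toList), ("instantiate".toList, "create".toList)] (by decide) "aradigm".toList (by decide) u
                (by simpa only [List.foldl_cons, List.foldl_nil] using hc))
            have hsetupSide : ∀ p, p < ("setup".toList : List Char).length →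
                ¬ ("paradigm".toList <+: List.drop p "setup".toList ++ Y) := by
              intro p hp
              have hp5 : p < 5 := lt_of_lt_of_eq hp (by decide)
              interval_cases p
              · intro hpref
                rw [(by decide : List.drop 0 ("setup".toList : List Char) = 's' :: "etup".toList),
                  List.cons_append,
                  (by decide : ("paradigm".toList : List Char) = 'p' :: "aradigm".toList)] at hpref
                exact absurd (List.cons_prefix_cons.mp hpref).1 (by decide)
              · intro hpref
                rw [(by decide : List.drop 1 ("setup".toList : List Char) = 'e' :: "tup".toList),
                  List.cons_append,
                  (by decide : ("paradigm".toList : List Char) = 'p' :: "aradigm".toList)] at hpref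
                exact absurd (List.cons_prefix_cons.mp hpref).1 (by decide)
              · intro hpref
                rw [(by decide : List.drop 2 ("setup".toList : List Char) = 't' :: "up".toList),
                  List.cons_append,
                  (by decide : ("paradigm".toList : List Char) = 'p' :: "aradigm".toList)] at hpref
                exact absurd (List.cons_prefix_cons.mp hpref).1 (by decide)
              · intro hpref
                rw [(by decide : List.drop 3 ("setup".toList : List Char) = 'u' :: "p".toList),
                  List.cons_append,
                  (by decide : ("paradigm".toList : List Char) = 'p' :: "aradigm".toList)] at hpref
                exact absurd (List.cons_prefix_cons.mp hpref).1 (by decide)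
              · intro hpref
                rw [(by decide : List.drop 4 ("setup".toList : List Char) = ['p']),
                  List.singleton_append,
                  (by decide : ("paradigm".toList : List Char) = 'p' :: "aradigm".toList)] at hpref
                exact hY (List.cons_prefix_cons.mp hpref).2
            rw [pvRepAppend "paradigm".toList "approach".toList "setup".toList Y hsetupSide]
            rw [pvRepAppend' "methodology".toList "method".toList "setup".toList _ (by decide)]
          have hscan : pvScan (c :: t) = "setup".toList ++ pvScan u := by
            rw [pvScan_cons_some _ _ _ _ hfind, pvDropTail (by decide) hu]
          have hbadu : "implementationaradigm".toList <:+: u :=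
            pvBadSplitImpl (by rw [hu]; exact hbad) ha
          intro heq
          rw [hchain, hscan] at heq
          exact hIHne _ u (by decide) hu hbadu (List.append_cancel_left heq)
      · by_cases h1 : "architecture".toList <+: (c :: t)
        · obtain ⟨u, hu⟩ := h1
          have hfind : pvRules.find? (fun p => p.1.isPrefixOf (c :: t)) = some ("architecture".toList, "structure".toList) := by
            rw [pvRules,
                List.find?_cons_of_neg (by simpa [List.isPrefixOf_iff_prefix] using h0),
                List.find?_cons_of_pos]
            rw [← hu]; simp [List.isPrefixOf_iff_prefix, List.prefix_append]
          have hchain : pvChain (c :: t) = "structure".toList ++ pvChain u := by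
            simp only [pvChain]
            rw [← hu, (by decide : pvRules = [("implementation".toList, "setup".toList)] ++ (("architecture".toList, "structure".toList) :: [("optimization".toList, "improvement".toList), ("integration".toList, "connection".toList), ("abstraction".toList, "simplified version".toList), ("instantiate".toList, "create".toList), ("paradigm".toList, "approach".toList), ("methodology".toList, "method".toList)]))]
            exact pvBranch _ _ _ _ (by decide) (by decide) (by decide) u
          have hscan : pvScan (c :: t) = "structure".toList ++ pvScan u := by
            rw [pvScan_cons_some _ _ _ _ hfind, pvDropTail (by decide) hu]
          have hbadu : "implementationaradigm".toList <:+: u :=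
            pvInfixAppendRight "architecture".toList u "implementationaradigm".toList (by decide) (by decide) (by rw [hu]; exact hbad)
          intro heq
          rw [hchain, hscan] at heq
          exact hIHne _ u (by decide) hu hbadu (List.append_cancel_left heq)
        · by_cases h2 : "optimization".toList <+: (c :: t)
          · obtain ⟨u, hu⟩ := h2
            have hfind : pvRules.find? (fun p => p.1.isPrefixOf (c :: t)) = some ("optimization".toList, "improvement".toList) := by
              rw [pvRules,
                  List.find?_cons_of_neg (by simpa [List.isPrefixOf_iff_prefix] using h0),
                  List.find?_cons_of_neg (by simpa [List.isPrefixOf_iff_prefix] using h1),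
                  List.find?_cons_of_pos]
              rw [← hu]; simp [List.isPrefixOf_iff_prefix, List.prefix_append]
            have hchain : pvChain (c :: t) = "improvement".toList ++ pvChain u := by
              simp only [pvChain]
              rw [← hu, (by decide : pvRules = [("implementation".toList, "setup".toList), ("architecture".toList, "structure".toList)] ++ (("optimization".toList, "improvement".toList) :: [("integration".toList, "connection".toList), ("abstraction".toList, "simplified version".toList), ("instantiate".toList, "create".toList), ("paradigm".toList, "approach".toList), ("methodology".toList, "method".toList)]))]
              exact pvBranch _ _ _ _ (by decide) (by decide) (by decide) u
            have hscan : pvScan (c :: t) = "improvement".toList ++ pvScan u := by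
              rw [pvScan_cons_some _ _ _ _ hfind, pvDropTail (by decide) hu]
            have hbadu : "implementationaradigm".toList <:+: u :=
              pvInfixAppendRight "optimization".toList u "implementationaradigm".toList (by decide) (by decide) (by rw [hu]; exact hbad)
            intro heq
            rw [hchain, hscan] at heq
            exact hIHne _ u (by decide) hu hbadu (List.append_cancel_left heq)
          · by_cases h3 : "integration".toList <+: (c :: t)
            · obtain ⟨u, hu⟩ := h3
              have hfind : pvRules.find? (fun p => p.1.isPrefixOf (c :: t)) = some ("integration".toList, "connection".toList) := by
                rw [pvRules,
                    List.find?_cons_of_neg (by simpa [List.isPrefixOf_iff_prefix] using h0),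
                    List.find?_cons_of_neg (by simpa [List.isPrefixOf_iff_prefix] using h1),
                    List.find?_cons_of_neg (by simpa [List.isPrefixOf_iff_prefix] using h2),
                    List.find?_cons_of_pos]
                rw [← hu]; simp [List.isPrefixOf_iff_prefix, List.prefix_append]
              have hchain : pvChain (c :: t) = "connection".toList ++ pvChain u := by
                simp only [pvChain]
                rw [← hu, (by decide : pvRules = [("implementation".toList, "setup".toList), ("architecture".toList, "structure".toList), ("optimization".toList, "improvement".toList)] ++ (("integration".toList, "connection".toList) :: [("abstraction".toList, "simplified version".toList), ("instantiate".toList, "create".toList), ("paradigm".toList, "approach".toList), ("methodology".toList, "method".toList)]))]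
                exact pvBranch _ _ _ _ (by decide) (by decide) (by decide) u
              have hscan : pvScan (c :: t) = "connection".toList ++ pvScan u := by
                rw [pvScan_cons_some _ _ _ _ hfind, pvDropTail (by decide) hu]
              have hbadu : "implementationaradigm".toList <:+: u :=
                pvInfixAppendRight "integration".toList u "implementationaradigm".toList (by decide) (by decide) (by rw [hu]; exact hbad)
              intro heq
              rw [hchain, hscan] at heq
              exact hIHne _ u (by decide) hu hbadu (List.append_cancel_left heq)
            · by_cases h4 : "abstraction".toList <+: (c :: t)
              · obtain ⟨u, hu⟩ := h4
                have hfind : pvRules.find? (fun p => p.1.isPrefixOf (c :: t)) = some ("abstraction".toList, "simplified version".toList) := by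
                  rw [pvRules,
                      List.find?_cons_of_neg (by simpa [List.isPrefixOf_iff_prefix] using h0),
                      List.find?_cons_of_neg (by simpa [List.isPrefixOf_iff_prefix] using h1),
                      List.find?_cons_of_neg (by simpa [List.isPrefixOf_iff_prefix] using h2),
                      List.find?_cons_of_neg (by simpa [List.isPrefixOf_iff_prefix] using h3),
                      List.find?_cons_of_pos]
                  rw [← hu]; simp [List.isPrefixOf_iff_prefix, List.prefix_append]
                have hchain : pvChain (c :: t) = "simplified version".toList ++ pvChain u := by
                  simp only [pvChain]
                  rw [← hu, (by decide : pvRules = [("implementation".toList, "setup".toList), ("architecture".toList, "structure".toList), ("optimization".toList, "improvement".toList), ("integration".toList, "connection".toList)] ++ (("abstraction".toList, "simplified version".toList) :: [("instantiate".toList, "create".toList), ("paradigm".toList, "approach".toList), ("methodology".toList, "method".toList)]))]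
                  exact pvBranch _ _ _ _ (by decide) (by decide) (by decide) u
                have hscan : pvScan (c :: t) = "simplified version".toList ++ pvScan u := by
                  rw [pvScan_cons_some _ _ _ _ hfind, pvDropTail (by decide) hu]
                have hbadu : "implementationaradigm".toList <:+: u :=
                  pvInfixAppendRight "abstraction".toList u "implementationaradigm".toList (by decide) (by decide) (by rw [hu]; exact hbad)
                intro heq
                rw [hchain, hscan] at heq
                exact hIHne _ u (by decide) hu hbadu (List.append_cancel_left heq)
              · by_cases h5 : "instantiate".toList <+: (c :: t)
                · obtain ⟨u, hu⟩ := h5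
                  have hfind : pvRules.find? (fun p => p.1.isPrefixOf (c :: t)) = some ("instantiate".toList, "create".toList) := by
                    rw [pvRules,
                        List.find?_cons_of_neg (by simpa [List.isPrefixOf_iff_prefix] using h0),
                        List.find?_cons_of_neg (by simpa [List.isPrefixOf_iff_prefix] using h1),
                        List.find?_cons_of_neg (by simpa [List.isPrefixOf_iff_prefix] using h2),
                        List.find?_cons_of_neg (by simpa [List.isPrefixOf_iff_prefix] using h3),
                        List.find?_cons_of_neg (by simpa [List.isPrefixOf_iff_prefix] using h4),
                        List.find?_cons_of_pos]
                    rw [← hu]; simp [List.isPrefixOf_iff_prefix, List.prefix_append]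
                  have hchain : pvChain (c :: t) = "create".toList ++ pvChain u := by
                    simp only [pvChain]
                    rw [← hu, (by decide : pvRules = [("implementation".toList, "setup".toList), ("architecture".toList, "structure".toList), ("optimization".toList, "improvement".toList), ("integration".toList, "connection".toList), ("abstraction".toList, "simplified version".toList)] ++ (("instantiate".toList, "create".toList) :: [("paradigm".toList, "approach".toList), ("methodology".toList, "method".toList)]))]
                    exact pvBranch _ _ _ _ (by decide) (by decide) (by decide) u
                  have hscan : pvScan (c :: t) = "create".toList ++ pvScan u := by
                    rw [pvScan_cons_some _ _ _ _ hfind, pvDropTail (by decide) hu]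
                  have hbadu : "implementationaradigm".toList <:+: u :=
                    pvInfixAppendRight "instantiate".toList u "implementationaradigm".toList (by decide) (by decide) (by rw [hu]; exact hbad)
                  intro heq
                  rw [hchain, hscan] at heq
                  exact hIHne _ u (by decide) hu hbadu (List.append_cancel_left heq)
                · by_cases h6 : "paradigm".toList <+: (c :: t)
                  · obtain ⟨u, hu⟩ := h6
                    have hfind : pvRules.find? (fun p => p.1.isPrefixOf (c :: t)) = some ("paradigm".toList, "approach".toList) := by
                      rw [pvRules,
                          List.find?_cons_of_neg (by simpa [List.isPrefixOf_iff_prefix] using h0),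
                          List.find?_cons_of_neg (by simpa [List.isPrefixOf_iff_prefix] using h1),
                          List.find?_cons_of_neg (by simpa [List.isPrefixOf_iff_prefix] using h2),
                          List.find?_cons_of_neg (by simpa [List.isPrefixOf_iff_prefix] using h3),
                          List.find?_cons_of_neg (by simpa [List.isPrefixOf_iff_prefix] using h4),
                          List.find?_cons_of_neg (by simpa [List.isPrefixOf_iff_prefix] using h5),
                          List.find?_cons_of_pos]
                      rw [← hu]; simp [List.isPrefixOf_iff_prefix, List.prefix_append]
                    have hchain : pvChain (c :: t) = "approach".toList ++ pvChain u := by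
                      simp only [pvChain]
                      rw [← hu, (by decide : pvRules = [("implementation".toList, "setup".toList), ("architecture".toList, "structure".toList), ("optimization".toList, "improvement".toList), ("integration".toList, "connection".toList), ("abstraction".toList, "simplified version".toList), ("instantiate".toList, "create".toList)] ++ (("paradigm".toList, "approach".toList) :: [("methodology".toList, "method".toList)]))]
                      exact pvBranch _ _ _ _ (by decide) (by decide) (by decide) u
                    have hscan : pvScan (c :: t) = "approach".toList ++ pvScan u := by
                      rw [pvScan_cons_some _ _ _ _ hfind, pvDropTail (by decide) hu]
                    have hbadu : "implementationaradigm".toList <:+: u :=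
                      pvInfixAppendRight "paradigm".toList u "implementationaradigm".toList (by decide) (by decide) (by rw [hu]; exact hbad)
                    intro heq
                    rw [hchain, hscan] at heq
                    exact hIHne _ u (by decide) hu hbadu (List.append_cancel_left heq)
                  · by_cases h7 : "methodology".toList <+: (c :: t)
                    · obtain ⟨u, hu⟩ := h7
                      have hfind : pvRules.find? (fun p => p.1.isPrefixOf (c :: t)) = some ("methodology".toList, "method".toList) := by
                        rw [pvRules,
                            List.find?_cons_of_neg (by simpa [List.isPrefixOf_iff_prefix] using h0),
                            List.find?_cons_of_neg (by simpa [List.isPrefixOf_iff_prefix] using h1),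
                            List.find?_cons_of_neg (by simpa [List.isPrefixOf_iff_prefix] using h2),
                            List.find?_cons_of_neg (by simpa [List.isPrefixOf_iff_prefix] using h3),
                            List.find?_cons_of_neg (by simpa [List.isPrefixOf_iff_prefix] using h4),
                            List.find?_cons_of_neg (by simpa [List.isPrefixOf_iff_prefix] using h5),
                            List.find?_cons_of_neg (by simpa [List.isPrefixOf_iff_prefix] using h6),
                            List.find?_cons_of_pos]
                        rw [← hu]; simp [List.isPrefixOf_iff_prefix, List.prefix_append]
                      have hchain : pvChain (c :: t) = "method".toList ++ pvChain u := by
                        simp only [pvChain]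
                        rw [← hu, (by decide : pvRules = [("implementation".toList, "setup".toList), ("architecture".toList, "structure".toList), ("optimization".toList, "improvement".toList), ("integration".toList, "connection".toList), ("abstraction".toList, "simplified version".toList), ("instantiate".toList, "create".toList), ("paradigm".toList, "approach".toList)] ++ (("methodology".toList, "method".toList) :: []))]
                        exact pvBranch _ _ _ _ (by decide) (by decide) (by decide) u
                      have hscan : pvScan (c :: t) = "method".toList ++ pvScan u := by
                        rw [pvScan_cons_some _ _ _ _ hfind, pvDropTail (by decide) hu]
                      have hbadu : "implementationaradigm".toList <:+: u :=
                        pvInfixAppendRight "methodology".toList u "implementationaradigm".toList (by decide) (by decide) (by rw [hu]; exact hbad)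
                      intro heq
                      rw [hchain, hscan] at heq
                      exact hIHne _ u (by decide) hu hbadu (List.append_cancel_left heq)
                    · have hfind : pvRules.find? (fun p => p.1.isPrefixOf (c :: t)) = none := by
                          rw [pvRules,
                            List.find?_cons_of_neg (by simpa [List.isPrefixOf_iff_prefix] using h0),
                            List.find?_cons_of_neg (by simpa [List.isPrefixOf_iff_prefix] using h1),
                            List.find?_cons_of_neg (by simpa [List.isPrefixOf_iff_prefix] using h2),
                            List.find?_cons_of_neg (by simpa [List.isPrefixOf_iff_prefix] using h3),
                            List.find?_cons_of_neg (by simpa [List.isPrefixOf_iff_prefix] using h4),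
                            List.find?_cons_of_neg (by simpa [List.isPrefixOf_iff_prefix] using h5),
                            List.find?_cons_of_neg (by simpa [List.isPrefixOf_iff_prefix] using h6),
                            List.find?_cons_of_neg (by simpa [List.isPrefixOf_iff_prefix] using h7)]
                          rfl
                      have hnp : ∀ pr ∈ pvRules, ¬ (pr.1 <+: (c :: t)) := by
                        intro pr hpr
                        rw [pvRules] at hpr
                        simp only [List.mem_cons, List.not_mem_nil, or_false] at hpr
                        rcases hpr with h | h | h | h | h | h | h | h
                        · rw [h]; exact h0
                        · rw [h]; exact h1
                        · rw [h]; exact h2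
                        · rw [h]; exact h3
                        · rw [h]; exact h4
                        · rw [h]; exact h5
                        · rw [h]; exact h6
                        · rw [h]; exact h7
                      have hchain : pvChain (c :: t) = c :: pvChain t := by
                        rw [pvChain, pvFoldCons _ _ _ (by decide) hnp (by decide), pvChain]
                      have hbadt : "implementationaradigm".toList <:+: t := by
                        rcases List.infix_cons_iff.mp hbad with hpre | hinf
                        · exact absurd (List.IsPrefix.trans (by decide : ("implementation".toList : List Char) <+: "implementationaradigm".toList) hpre) h0
                        · exact hinf
                      have hlt : t.length ≤ n := by
                        simp only [List.length_cons] at hl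
                        omega
                      intro heq
                      rw [hchain, pvScan_cons_none _ _ hfind] at heq
                      exact ih t hlt hbadt (List.cons.inj heq).2

-- bridge: port A computes the chain
theorem pvPortA_toList (text : String) :
    (simplify_technical_terms_py text).toList = pvChain text.toList := by
  have hitems : pvReplacements.items =
    [("implementation", "setup"), ("architecture", "structure"),
     ("optimization", "improvement"), ("integration", "connection"),
     ("abstraction", "simplified version"), ("instantiate", "create"),
     ("paradigm", "approach"), ("methodology", "method")] := by decide
  rw [simplify_technical_terms_py, hitems]
  simp only [List.foldl_cons, List.foldl_nil, PySem.Str.toList_replace]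
  rw [pvChain, pvRules]
  simp only [List.foldl_cons, List.foldl_nil]
  rw [pvRep_eq_replace _ _ (by decide), pvRep_eq_replace _ _ (by decide),
    pvRep_eq_replace _ _ (by decide), pvRep_eq_replace _ _ (by decide),
    pvRep_eq_replace _ _ (by decide), pvRep_eq_replace _ _ (by decide),
    pvRep_eq_replace _ _ (by decide), pvRep_eq_replace _ _ (by decide)]

-- bridge: port B computes the scan
theorem pvPortB_toList (text : String) :
    (simplify_technical_terms_py_alt text).toList = pvScan text.toList := by
  rw [simplify_technical_terms_py_alt, String.toList_ofList]


-- ===== VERDICT (by name: the statement is the Claim_ definition above) =====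
theorem simplify_technical_terms_py_spec : Claim_unchanged_simplify_technical_terms_py := by
  intro text _ hD
  apply String.toList_inj.mp
  rw [pvPortA_toList, pvPortB_toList]
  exact pvChainEqScan text.toList.length text.toList le_rfl
    (fun hc => hD ((PySem.Str.isIn_iff_infix _ _).mpr hc))

theorem simplify_technical_terms_py_changed : Claim_changed_simplify_technical_terms_py := by
  unfold Claim_changed_simplify_technical_terms_py
  refine ⟨by decide, by decide, by decide, ?_, by decide⟩
  simp only [pvDiffWitness_simplify_technical_terms_py, pvDiffWitnessOut_simplify_technical_terms_py]
  rw [simplify_technical_terms_py_alt]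
  apply String.toList_inj.mp
  rw [String.toList_ofList,
    (by decide : ("implementationaradigm".toList : List Char) = 'i' :: "mplementationaradigm".toList),
    pvScan_cons_some _ _ "implementation".toList "setup".toList (by decide),
    (by decide : List.drop (("implementation".toList : List Char).length - 1) ("mplementationaradigm".toList : List Char) = "aradigm".toList)]
  rw [(by decide : ("aradigm".toList : List Char) = 'a' :: "radigm".toList), pvScan_cons_none _ _ (by decide)]
  rw [(by decide : ("radigm".toList : List Char) = 'r' :: "adigm".toList), pvScan_cons_none _ _ (by decide)]
  rw [(by decide : ("adigm".toList : List Char) = 'a' :: "digm".toList), pvScan_cons_none _ _ (by decide)]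
  rw [(by decide : ("digm".toList : List Char) = 'd' :: "igm".toList), pvScan_cons_none _ _ (by decide)]
  rw [(by decide : ("igm".toList : List Char) = 'i' :: "gm".toList), pvScan_cons_none _ _ (by decide)]
  rw [(by decide : ("gm".toList : List Char) = 'g' :: "m".toList), pvScan_cons_none _ _ (by decide)]
  rw [(by decide : ("m".toList : List Char) = 'm' :: "".toList), pvScan_cons_none _ _ (by decide)]
  rw [(by decide : ("".toList : List Char) = ([] : List Char)), pvScan_nil]
  decide

theorem simplify_technical_terms_py_tight : Claim_exact_simplify_technical_terms_py := by
  intro text _ hD heq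
  exact pvChainNeScanAux text.toList.length text.toList le_rfl
    ((PySem.Str.isIn_iff_infix _ _).mp hD)
    (by rw [← pvPortA_toList, ← pvPortB_toList, heq])
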